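-- pv_equiv track=rewrite | github.com/yuchia0221/Grind-75 | Binary Search/981-TimeBasedKey-ValueStore/solution.py | binary_seacrch
-- ===== SOURCE A (Python) =====
-- from typing import List, Union
--
-- def binary_seacrch(data: List[Union[str, int]], timestamp: int) -> str:
--     left, right = 0, len(data)-1
--
--     answer = ""
--     while left <= right:
--         mid = left + (right-left) // 2
--         if data[mid][1] <= timestamp:
--             left = mid + 1
--             answer = data[mid][0]
--         else:
--             right = mid - 1
--
--     return answer
-- ===== SOURCE B (Python) =====
-- def binary_seacrch(data, timestamp):
--     # Recursion on list slices: no indices at all. The middle element of a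
--     # segment of length n sits at (n-1)//2, which is exactly where A's index
--     # arithmetic probes, so the probe sequence is identical.
--     def go(seg, answer):
--         if not seg:
--             return answer
--         m = (len(seg) - 1) // 2
--         key, ts = seg[m]
--         if ts <= timestamp:
--             return go(seg[m + 1:], key)
--         return go(seg[:m], answer)
--     return go(data, "")
-- ===== Notes on version B (the rewrite author's own statement) =====
-- stated objective: alternative
-- what changed: Replaced the index-based while loop (mutable left/right/answer over the whole list) by an index-free recursion on list slices: each step probes the middle element of the current segment and recurses on seg[m+1:] or seg[:m], which visits exactly the same elements.
import Mathlib
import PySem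

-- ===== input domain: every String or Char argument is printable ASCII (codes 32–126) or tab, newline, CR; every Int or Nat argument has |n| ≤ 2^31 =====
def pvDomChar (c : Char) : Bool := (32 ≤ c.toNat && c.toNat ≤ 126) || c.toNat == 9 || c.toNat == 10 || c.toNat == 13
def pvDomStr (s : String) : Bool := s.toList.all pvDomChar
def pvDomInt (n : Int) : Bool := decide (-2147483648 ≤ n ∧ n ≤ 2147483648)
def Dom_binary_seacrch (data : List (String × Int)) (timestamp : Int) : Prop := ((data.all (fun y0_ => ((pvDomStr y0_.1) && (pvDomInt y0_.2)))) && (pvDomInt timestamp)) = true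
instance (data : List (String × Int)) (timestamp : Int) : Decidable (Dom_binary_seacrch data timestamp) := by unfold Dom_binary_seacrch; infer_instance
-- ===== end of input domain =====

-- B replaces A's index-based while loop (mutable left/right/answer over the whole
-- list) by an index-free recursion on list slices (objective: alternative).

-- ===== PORT A =====
-- A's while loop as tail recursion over the state (left, right, answer).
-- data[mid] is ported with pyGet?; the `none` (IndexError) branch is unreachable
-- since 0 ≤ left ≤ mid ≤ right ≤ len-1 whenever the loop body runs.
def pvLoopA (data : List (String × Int)) (timestamp : Int)
    (left right : Int) (answer : String) : String :=
  if h : left ≤ right then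
    let mid := left + PySem.Int.floordiv (right - left) 2
    let e := (PySem.List.pyGet? data mid).getD ("", 0)
    if e.2 ≤ timestamp then
      pvLoopA data timestamp (mid + 1) right e.1
    else
      pvLoopA data timestamp left (mid - 1) answer
  else answer
termination_by (right + 1 - left).toNat
decreasing_by
  · have := PySem.Int.floordiv_eq_ediv_of_pos (a := right - left) (show (0:Int) < 2 by norm_num)
    omega
  · have := PySem.Int.floordiv_eq_ediv_of_pos (a := right - left) (show (0:Int) < 2 by norm_num)
    omega

def binary_seacrch (data : List (String × Int)) (timestamp : Int) : String :=
  pvLoopA data timestamp 0 (data.length - 1) ""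

-- ===== PORT B =====
-- B's recursive helper `go` on list segments. `seg[m]` with 0 ≤ m < seg.length is
-- exactly `seg.getD m _`; the slices `seg[m+1:]` / `seg[:m]` with in-range
-- nonnegative bounds are exactly `List.drop (m+1)` / `List.take m`.
def pvGoB (timestamp : Int) (seg : List (String × Int)) (answer : String) : String :=
  if seg.isEmpty then answer
  else
    let m := (seg.length - 1) / 2
    let e := seg.getD m ("", 0)
    if e.2 ≤ timestamp then
      pvGoB timestamp (seg.drop (m + 1)) e.1
    else
      pvGoB timestamp (seg.take m) answer
termination_by seg.length
decreasing_by
  · have : seg.length ≠ 0 := by simpa [List.isEmpty_iff_length_eq_zero] using ‹¬ seg.isEmpty = true›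
    simp [List.length_drop]; omega
  · have : seg.length ≠ 0 := by simpa [List.isEmpty_iff_length_eq_zero] using ‹¬ seg.isEmpty = true›
    simp [List.length_take]; omega

def binary_seacrch_alt (data : List (String × Int)) (timestamp : Int) : String :=
  pvGoB timestamp data ""

-- ===== PRECONDITION & SPEC =====
def Spec_binary_seacrch (data : List (String × Int)) (timestamp : Int) (out : String) : Prop := out = binary_seacrch_alt data timestamp
instance (data : List (String × Int)) (timestamp : Int) (out : String) : Decidable (Spec_binary_seacrch data timestamp out) := by unfold Spec_binary_seacrch; infer_instance

-- ===== CLAIM (what is proved, stated in full; the proofs are below) =====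
def Claim_equal_binary_seacrch : Prop := ∀ (data : List (String × Int)) (timestamp : Int), Dom_binary_seacrch data timestamp → Spec_binary_seacrch data timestamp (binary_seacrch data timestamp)

-- ===== LEMMAS AND PROOFS =====

-- A's loop from state (l, r, ans) equals B's recursion on the slice data[l..r].
theorem pvLoopA_eq_goB (data : List (String × Int)) (timestamp : Int) :
    ∀ (n : Nat) (l r : Int) (ans : String),
      0 ≤ l → r < data.length → (r + 1 - l).toNat ≤ n →
      pvLoopA data timestamp l r ans
        = pvGoB timestamp ((data.drop l.toNat).take (r + 1 - l).toNat) ans := by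
  intro n
  induction n with
  | zero =>
    intro l r ans hl hr hn
    have hlr : ¬ l ≤ r := by omega
    rw [pvLoopA, pvGoB]
    simp [hlr, show (r + 1 - l).toNat = 0 by omega]
  | succ n ih =>
    intro l r ans hl hr hn
    rw [pvLoopA, pvGoB]
    by_cases hlr : l ≤ r
    · -- the loop body runs; name the quantities on both sides
      set k := (r + 1 - l).toNat with hk
      have hfd : PySem.Int.floordiv (r - l) 2 = (r - l) / 2 :=
        PySem.Int.floordiv_eq_ediv_of_pos (by norm_num)
      set mid := l + PySem.Int.floordiv (r - l) 2 with hmiddef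
      have hmid : mid = l + (r - l) / 2 := by rw [hmiddef, hfd]
      have hseglen : ((data.drop l.toNat).take k).length = k := by
        simp [List.length_take, List.length_drop]; omega
      have hkpos : 0 < k := by omega
      have hne : ¬ ((data.drop l.toNat).take k).isEmpty = true := by
        simp only [List.isEmpty_iff_length_eq_zero, hseglen]; omega
      simp only [dif_pos hlr, if_neg hne]
      set m := (((data.drop l.toNat).take k).length - 1) / 2 with hmdef
      have hm : m = (k - 1) / 2 := by rw [hmdef, hseglen]
      have hmidNat : mid.toNat = l.toNat + m := by rw [hm]; omega
      have hmidlb : l ≤ mid := by omega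
      have hmidub : mid ≤ r := by omega
      have hmlt : m < k := by omega
      -- the probed element is the same on both sides
      have hel : (PySem.List.pyGet? data mid).getD ("", 0)
          = ((data.drop l.toNat).take k).getD m ("", 0) := by
        rw [PySem.List.pyGet?_of_nonneg data (show (0:Int) ≤ mid by omega)]
        simp only [List.getD_eq_getElem?_getD, List.getElem?_take_of_lt hmlt,
          List.getElem?_drop, hmidNat]
      rw [← hel]
      by_cases hts : ((PySem.List.pyGet? data mid).getD ("", 0)).2 ≤ timestamp
      · simp only [if_pos hts]
        have hslice : (data.drop (mid + 1).toNat).take (r + 1 - (mid + 1)).toNat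
            = ((data.drop l.toNat).take k).drop (m + 1) := by
          rw [List.drop_take, List.drop_drop,
              show (mid + 1).toNat = l.toNat + (m + 1) by omega,
              show (r + 1 - (mid + 1)).toNat = k - (m + 1) by omega]
        rw [ih (mid + 1) r _ (by omega) hr (by omega), hslice]
      · simp only [if_neg hts]
        have hslice : (data.drop l.toNat).take (mid - 1 + 1 - l).toNat
            = ((data.drop l.toNat).take k).take m := by
          rw [List.take_take, show (mid - 1 + 1 - l).toNat = min m k by omega]
        rw [ih l (mid - 1) ans hl (by omega) (by omega), hslice]
    · simp [hlr, show (r + 1 - l).toNat = 0 by omega]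

-- ===== VERDICT (by name: the statement is the Claim_ definition above) =====
theorem binary_seacrch_spec : Claim_equal_binary_seacrch := by
  intro data timestamp _
  unfold Spec_binary_seacrch binary_seacrch binary_seacrch_alt
  rw [pvLoopA_eq_goB data timestamp ((data.length : Int) - 1 + 1 - 0).toNat 0 ((data.length : Int) - 1) ""
      le_rfl (by omega) le_rfl]
  simp
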